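-- pv_equiv track=rewrite | github.com/pgallino/ALGO-1 | parcialito_2/diccionario_palabras-precedidas.py | contar_precedidas
-- ===== SOURCE A (Python) =====
-- def contar_precedidas(cadena):
--
--     diccionario = {}
--     palabras = cadena.lower().split()
--
--     for indice in range(1,len(palabras)):
--         palabra = palabras[indice]
--         palabra_anterior = palabras[indice-1]
--         diccionario[palabra] = diccionario.get(palabra, {})
--         diccionario[palabra][palabra_anterior] = diccionario[palabra].get(palabra_anterior, 0) + 1
--
--     return diccionario
-- ===== SOURCE B (Python) =====
-- def contar_precedidas(cadena):
--     palabras = cadena.lower().split()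
--     pares = list(zip(palabras, palabras[1:]))
--     resultado = {}
--     for actual in dict.fromkeys(c for _, c in pares):
--         anteriores = [p for p, c in pares if c == actual]
--         resultado[actual] = {p: anteriores.count(p) for p in dict.fromkeys(anteriores)}
--     return resultado
-- ===== Notes on version B (the rewrite author's own statement) =====
-- stated objective: alternative
-- what changed: B materialises the list of consecutive (previous, current) word pairs once, then builds the result by a group-by pass: for each distinct current word it filters the pair list and counts each distinct predecessor with a comprehension, instead of A's single indexed loop that mutates nested dicts incrementally.
import Mathlib
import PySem

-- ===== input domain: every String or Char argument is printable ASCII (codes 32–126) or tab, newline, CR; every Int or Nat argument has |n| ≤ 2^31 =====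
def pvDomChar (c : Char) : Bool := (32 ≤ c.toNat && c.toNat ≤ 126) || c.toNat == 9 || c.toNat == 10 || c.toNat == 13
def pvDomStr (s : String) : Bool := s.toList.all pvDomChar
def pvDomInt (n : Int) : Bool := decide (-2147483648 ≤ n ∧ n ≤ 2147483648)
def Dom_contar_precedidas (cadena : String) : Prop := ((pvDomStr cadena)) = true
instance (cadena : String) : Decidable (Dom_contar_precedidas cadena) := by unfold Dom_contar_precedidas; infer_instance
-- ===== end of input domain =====

-- B replaces A's single indexed loop over nested mutated dicts by a group-by over the
-- materialised (previous, current) pair list; alternative decomposition, same results.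

-- ===== PORT A =====
def contar_precedidas (cadena : String) : List (String × List (String × Int)) :=
  let palabras := PySem.Str.split₀ (PySem.Str.lower cadena)
  let diccionario : PySem.Dict String (PySem.Dict String Int) :=
    (PySem.List.pyRange 1 (palabras.length : Int) 1).foldl
      (fun diccionario indice =>
        let palabra := PySem.List.pyGetD palabras indice ""
        let palabra_anterior := PySem.List.pyGetD palabras (indice - 1) ""
        let diccionario := diccionario.insert palabra (diccionario.getD palabra PySem.Dict.empty)
        diccionario.insert palabra
          ((diccionario.getD palabra PySem.Dict.empty).insert palabra_anterior
            ((diccionario.getD palabra PySem.Dict.empty).getD palabra_anterior 0 + 1)))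
      PySem.Dict.empty
  diccionario.items.map (fun p => (p.1, p.2.items))

-- ===== PORT B =====
def contar_precedidas_alt (cadena : String) : List (String × List (String × Int)) :=
  let palabras := PySem.Str.split₀ (PySem.Str.lower cadena)
  let pares := palabras.zip (PySem.List.slice palabras (some 1) none)
  let resultado : PySem.Dict String (PySem.Dict String Int) :=
    (PySem.List.dedup (pares.map (·.2))).foldl
      (fun resultado actual =>
        let anteriores := (pares.filter (fun q => q.2 == actual)).map (·.1)
        resultado.insert actual
          (PySem.Dict.mk ((PySem.List.dedup anteriores).map
            (fun p => (p, (PySem.List.count anteriores p : Int))))))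
      PySem.Dict.empty
  resultado.items.map (fun p => (p.1, p.2.items))

-- ===== PRECONDITION & SPEC =====
def Spec_contar_precedidas (cadena : String) (out : List (String × List (String × Int))) : Prop := out = contar_precedidas_alt cadena
instance (cadena : String) (out : List (String × List (String × Int))) : Decidable (Spec_contar_precedidas cadena out) := by unfold Spec_contar_precedidas; infer_instance

-- ===== CLAIM (what is proved, stated in full; the proofs are below) =====
def Claim_equal_contar_precedidas : Prop := ∀ (cadena : String), Dom_contar_precedidas cadena → Spec_contar_precedidas cadena (contar_precedidas cadena)

-- ===== LEMMAS AND PROOFS =====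

-- A's loop over range(1, len) reading ws[i-1], ws[i] is the fold over consecutive pairs.
theorem pv_range_pair_fold {β : Type} (step : β → String → String → β) :
    ∀ (ws : List String) (b : β),
      (List.range (ws.length - 1)).foldl
          (fun b k => step b (ws.getD k "") (ws.getD (k+1) "")) b
        = (ws.zip (ws.drop 1)).foldl (fun b q => step b q.1 q.2) b := by
  intro ws
  induction ws with
  | nil => intro b; simp
  | cons x tl ih =>
    intro b
    cases tl with
    | nil => simp
    | cons y tl' =>
      have h1 : (x :: y :: tl').length - 1 = tl'.length + 1 := by simp
      rw [h1, List.range_succ_eq_map, List.foldl_cons, List.foldl_map]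
      simpa using ih (step b x y)

theorem pv_pyfold_pair {β : Type} (step : β → String → String → β) (ws : List String) (b : β) :
    (PySem.List.pyRange 1 (ws.length : Int) 1).foldl
        (fun b j => step b (PySem.List.pyGetD ws (j - 1) "") (PySem.List.pyGetD ws j "")) b
      = (ws.zip (ws.drop 1)).foldl (fun b q => step b q.1 q.2) b := by
  rw [PySem.List.pyRange_one, List.foldl_map, ← pv_range_pair_fold step ws b]
  have hlen : ((ws.length : Int) - 1).toNat = ws.length - 1 := by omega
  rw [hlen]
  apply PySem.List.foldl_congr_mem
  intro b k hk
  have h1 : (1 : Int) + (k : Int) - 1 = ((k : Nat) : Int) := by ring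
  have h2 : (1 : Int) + (k : Int) = (((k + 1 : Nat)) : Int) := by push_cast; ring
  rw [h1, h2, PySem.List.pyGetD_natCast, PySem.List.pyGetD_natCast]

-- A's double insert at the same key collapses to one insert.
theorem pv_stepA_collapse (d : PySem.Dict String (PySem.Dict String Int)) (p c : String) :
    (let d' := d.insert c (d.getD c PySem.Dict.empty)
     d'.insert c ((d'.getD c PySem.Dict.empty).insert p
       ((d'.getD c PySem.Dict.empty).getD p 0 + 1)))
    = d.insert c ((d.getD c PySem.Dict.empty).insert p
        ((d.getD c PySem.Dict.empty).getD p 0 + 1)) := by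
  simp [PySem.Dict.getD_insert_self, PySem.Dict.insert_insert_self]

-- what A's fold holds at key c: the count-fold over the predecessors of c seen so far
theorem pv_foldA_getD (l : List (String × String)) :
    ∀ (d : PySem.Dict String (PySem.Dict String Int)) (c : String),
      (l.foldl (fun d q => d.insert q.2 ((d.getD q.2 PySem.Dict.empty).insert q.1
          ((d.getD q.2 PySem.Dict.empty).getD q.1 0 + 1))) d).getD c PySem.Dict.empty
        = ((l.filter (fun q => q.2 == c)).map (·.1)).foldl
            (fun i p => i.insert p (i.getD p 0 + 1)) (d.getD c PySem.Dict.empty) := by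
  induction l with
  | nil => intro d c; simp
  | cons q t ih =>
    intro d c
    rw [List.foldl_cons, ih]
    by_cases h : q.2 = c
    · subst h
      simp [PySem.Dict.getD_insert_self]
    · have hb : (q.2 == c) = false := by simp [h]
      rw [List.filter_cons_of_neg (by simp [hb])]
      simp only [PySem.Dict.getD_insert, if_neg (fun hc : c = q.2 => h hc.symm)]

theorem pv_main (ws : List String) :
    (let diccionario : PySem.Dict String (PySem.Dict String Int) :=
      (PySem.List.pyRange 1 (ws.length : Int) 1).foldl
        (fun (diccionario : PySem.Dict String (PySem.Dict String Int)) indice =>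
          let palabra := PySem.List.pyGetD ws indice ""
          let palabra_anterior := PySem.List.pyGetD ws (indice - 1) ""
          let diccionario := diccionario.insert palabra (diccionario.getD palabra PySem.Dict.empty)
          diccionario.insert palabra
            ((diccionario.getD palabra PySem.Dict.empty).insert palabra_anterior
              ((diccionario.getD palabra PySem.Dict.empty).getD palabra_anterior 0 + 1)))
        PySem.Dict.empty
     diccionario.items.map (fun p => (p.1, p.2.items)))
    = (let pares := ws.zip (PySem.List.slice ws (some 1) none)
       let resultado : PySem.Dict String (PySem.Dict String Int) :=
        (PySem.List.dedup (pares.map (·.2))).foldl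
          (fun resultado actual =>
            let anteriores := (pares.filter (fun q => q.2 == actual)).map (·.1)
            resultado.insert actual
              (PySem.Dict.mk ((PySem.List.dedup anteriores).map
                (fun p => (p, (PySem.List.count anteriores p : Int))))))
          PySem.Dict.empty
       resultado.items.map (fun p => (p.1, p.2.items))) := by
  have hslice : PySem.List.slice ws (some 1) none = ws.drop 1 := by
    simpa using PySem.List.slice_from (xs := ws) (a := 1) (by norm_num)
  -- collapse A's loop body to a single insert per step
  have hstep : (fun (b : PySem.Dict String (PySem.Dict String Int)) (q : String × String) =>
        (let d' := b.insert q.2 (b.getD q.2 PySem.Dict.empty)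
         d'.insert q.2 ((d'.getD q.2 PySem.Dict.empty).insert q.1
           ((d'.getD q.2 PySem.Dict.empty).getD q.1 0 + 1))))
      = (fun (d : PySem.Dict String (PySem.Dict String Int)) (q : String × String) =>
          d.insert q.2 ((d.getD q.2 PySem.Dict.empty).insert q.1
            ((d.getD q.2 PySem.Dict.empty).getD q.1 0 + 1))) := by
    funext d q; exact pv_stepA_collapse d q.1 q.2
  -- A's indexed fold is the fold over the consecutive pairs
  have hfold :
      (PySem.List.pyRange 1 (ws.length : Int) 1).foldl
        (fun (diccionario : PySem.Dict String (PySem.Dict String Int)) indice =>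
          let palabra := PySem.List.pyGetD ws indice ""
          let palabra_anterior := PySem.List.pyGetD ws (indice - 1) ""
          let diccionario := diccionario.insert palabra (diccionario.getD palabra PySem.Dict.empty)
          diccionario.insert palabra
            ((diccionario.getD palabra PySem.Dict.empty).insert palabra_anterior
              ((diccionario.getD palabra PySem.Dict.empty).getD palabra_anterior 0 + 1)))
        PySem.Dict.empty
      = (ws.zip (ws.drop 1)).foldl
          (fun (d : PySem.Dict String (PySem.Dict String Int)) (q : String × String) => d.insert q.2 ((d.getD q.2 PySem.Dict.empty).insert q.1
            ((d.getD q.2 PySem.Dict.empty).getD q.1 0 + 1))) PySem.Dict.empty := by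
    have h2 : (PySem.List.pyRange 1 (ws.length : Int) 1).foldl
        (fun (diccionario : PySem.Dict String (PySem.Dict String Int)) indice =>
          let palabra := PySem.List.pyGetD ws indice ""
          let palabra_anterior := PySem.List.pyGetD ws (indice - 1) ""
          let diccionario := diccionario.insert palabra (diccionario.getD palabra PySem.Dict.empty)
          diccionario.insert palabra
            ((diccionario.getD palabra PySem.Dict.empty).insert palabra_anterior
              ((diccionario.getD palabra PySem.Dict.empty).getD palabra_anterior 0 + 1)))
        PySem.Dict.empty
      = (PySem.List.pyRange 1 (ws.length : Int) 1).foldl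
          (fun b j =>
            b.insert (PySem.List.pyGetD ws j "")
              ((b.getD (PySem.List.pyGetD ws j "") PySem.Dict.empty).insert
                (PySem.List.pyGetD ws (j - 1) "")
                ((b.getD (PySem.List.pyGetD ws j "") PySem.Dict.empty).getD
                  (PySem.List.pyGetD ws (j - 1) "") 0 + 1)))
          PySem.Dict.empty := by
      apply PySem.List.foldl_congr_mem
      intro b j hj
      exact pv_stepA_collapse b (PySem.List.pyGetD ws (j - 1) "") (PySem.List.pyGetD ws j "")
    exact h2.trans (pv_pyfold_pair (fun (b : PySem.Dict String (PySem.Dict String Int)) p c =>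
      b.insert c ((b.getD c PySem.Dict.empty).insert p
        ((b.getD c PySem.Dict.empty).getD p 0 + 1))) ws PySem.Dict.empty)
  show ((PySem.List.pyRange 1 (ws.length : Int) 1).foldl
        (fun (diccionario : PySem.Dict String (PySem.Dict String Int)) indice =>
          let palabra := PySem.List.pyGetD ws indice ""
          let palabra_anterior := PySem.List.pyGetD ws (indice - 1) ""
          let diccionario := diccionario.insert palabra (diccionario.getD palabra PySem.Dict.empty)
          diccionario.insert palabra
            ((diccionario.getD palabra PySem.Dict.empty).insert palabra_anterior
              ((diccionario.getD palabra PySem.Dict.empty).getD palabra_anterior 0 + 1)))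
        PySem.Dict.empty).items.map (fun p => (p.1, p.2.items))
    = ((PySem.List.dedup ((ws.zip (PySem.List.slice ws (some 1) none)).map (·.2))).foldl
          (fun resultado actual =>
            resultado.insert actual
              (PySem.Dict.mk ((PySem.List.dedup
                  (((ws.zip (PySem.List.slice ws (some 1) none)).filter
                    (fun q => q.2 == actual)).map (·.1))).map
                (fun p => (p, (PySem.List.count (((ws.zip (PySem.List.slice ws (some 1) none)).filter
                    (fun q => q.2 == actual)).map (·.1)) p : Int))))))
          PySem.Dict.empty).items.map (fun p => (p.1, p.2.items))
  rw [hslice]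
  refine Eq.trans (congrArg
    (fun d : PySem.Dict String (PySem.Dict String Int) =>
      d.items.map (fun p => (p.1, p.2.items))) hfold) ?_
  -- the result's keys, in order, with unique keys
  have hnd : ((ws.zip (ws.drop 1)).foldl
      (fun (d : PySem.Dict String (PySem.Dict String Int)) (q : String × String) => d.insert q.2 ((d.getD q.2 PySem.Dict.empty).insert q.1
        ((d.getD q.2 PySem.Dict.empty).getD q.1 0 + 1))) PySem.Dict.empty).keys.Nodup := by
    exact PySem.Dict.nodup_keys_foldl_insert_key _ _ _ _ PySem.Dict.nodup_keys_empty
  rw [PySem.Dict.items_eq_map_keys _ hnd PySem.Dict.empty,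
      PySem.Dict.keys_foldl_insert_key]
  -- B's loop inserts fresh distinct keys: its items are the mapped dedup list
  have hB : ((PySem.List.dedup ((ws.zip (ws.drop 1)).map (·.2))).foldl
        (fun resultado actual =>
          resultado.insert actual
            (PySem.Dict.mk ((PySem.List.dedup
                (((ws.zip (ws.drop 1)).filter (fun q => q.2 == actual)).map (·.1))).map
              (fun p => (p, (PySem.List.count (((ws.zip (ws.drop 1)).filter
                  (fun q => q.2 == actual)).map (·.1)) p : Int))))))
        PySem.Dict.empty).items
      = (PySem.List.dedup ((ws.zip (ws.drop 1)).map (·.2))).map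
          (fun actual => (actual,
            PySem.Dict.mk ((PySem.List.dedup
                (((ws.zip (ws.drop 1)).filter (fun q => q.2 == actual)).map (·.1))).map
              (fun p => (p, (PySem.List.count (((ws.zip (ws.drop 1)).filter
                  (fun q => q.2 == actual)).map (·.1)) p : Int)))))) := by
    have := PySem.Dict.items_foldl_insert_fresh
      (l := PySem.List.dedup ((ws.zip (ws.drop 1)).map (·.2)))
      (k := fun a => a)
      (v := fun actual => PySem.Dict.mk ((PySem.List.dedup
                (((ws.zip (ws.drop 1)).filter (fun q => q.2 == actual)).map (·.1))).map
              (fun p => (p, (PySem.List.count (((ws.zip (ws.drop 1)).filter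
                  (fun q => q.2 == actual)).map (·.1)) p : Int)))))
      (d := PySem.Dict.empty)
      (by intro a _; exact PySem.Dict.contains_empty a)
      (by simp)
    simpa using this
  rw [hB, List.map_map, List.map_map]
  simp only [PySem.Dict.keys_empty, PySem.List.dedup_eq_ofList, PySem.Set.update_nil_left]
  apply List.map_congr_left
  intro c hc
  simp only [Function.comp]
  refine Prod.ext rfl ?_
  show (((ws.zip (ws.drop 1)).foldl
      (fun (d : PySem.Dict String (PySem.Dict String Int)) (q : String × String) => d.insert q.2 ((d.getD q.2 PySem.Dict.empty).insert q.1
        ((d.getD q.2 PySem.Dict.empty).getD q.1 0 + 1))) PySem.Dict.empty).getD c PySem.Dict.empty).items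
    = (PySem.Set.ofList (((ws.zip (ws.drop 1)).filter (fun q => q.2 == c)).map (·.1))).map
        (fun p => (p, (PySem.List.count (((ws.zip (ws.drop 1)).filter
            (fun q => q.2 == c)).map (·.1)) p : Int)))
  rw [pv_foldA_getD]
  simp only [PySem.Dict.getD_empty]
  rw [PySem.Dict.foldl_insert_getD_add_one_eq_counter, PySem.Dict.items_counter]
  simp [PySem.List.count_eq]

-- ===== VERDICT (by name: the statement is the Claim_ definition above) =====
theorem contar_precedidas_spec : Claim_equal_contar_precedidas := by
  intro cadena _
  unfold Spec_contar_precedidas contar_precedidas contar_precedidas_alt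
  exact pv_main (PySem.Str.split₀ (PySem.Str.lower cadena))
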